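-- pv_equiv track=rewrite | github.com/fescofesco/CCC | Challenge 2025/Johannes/LEVEL5/level5_solution.py | simulate_path
-- ===== SOURCE A (Python) =====
-- def simulate_path(x_seq, y_seq):
--     """Simulate the path taken by executing the sequences in parallel."""
--     positions = []
--     x, y = 0, 0
--     x_idx, y_idx = 0, 0
--     x_elapsed, y_elapsed = 0, 0
--
--     max_len = max(len(x_seq), len(y_seq))
--
--     while x_idx < len(x_seq) or y_idx < len(y_seq):
--         # Process X
--         if x_idx < len(x_seq):
--             x_pace = x_seq[x_idx]
--             pace_duration = abs(x_pace) if x_pace != 0 else 1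
--
--             if x_elapsed == 0 and x_pace != 0:
--                 x += 1 if x_pace > 0 else -1
--
--             x_elapsed += 1
--             if x_elapsed >= pace_duration:
--                 x_idx += 1
--                 x_elapsed = 0
--
--         # Process Y
--         if y_idx < len(y_seq):
--             y_pace = y_seq[y_idx]
--             pace_duration = abs(y_pace) if y_pace != 0 else 1
--
--             if y_elapsed == 0 and y_pace != 0:
--                 y += 1 if y_pace > 0 else -1
--
--             y_elapsed += 1
--             if y_elapsed >= pace_duration:
--                 y_idx += 1
--                 y_elapsed = 0
--
--         positions.append((x, y))
--
--     return positions
-- ===== SOURCE B (Python) =====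
-- def simulate_path(x_seq, y_seq):
--     """Expand each axis into a per-time-step position timeline, then zip the
--     two timelines, holding the last position (0 if the timeline is empty)."""
--     def timeline(seq):
--         tl = []
--         pos = 0
--         for p in seq:
--             d = abs(p) if p != 0 else 1
--             if p != 0:
--                 pos += 1 if p > 0 else -1
--             tl.extend([pos] * d)
--         return tl
--
--     def at(tl, t):
--         if t < len(tl):
--             return tl[t]
--         return tl[-1] if tl else 0
--
--     tx = timeline(x_seq)
--     ty = timeline(y_seq)
--     return [(at(tx, t), at(ty, t)) for t in range(max(len(tx), len(ty)))]
-- ===== Notes on version B (the rewrite author's own statement) =====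
-- stated objective: alternative
-- what changed: B expands each axis independently into a per-time-step position timeline and then zips the two timelines with last-value padding, instead of A's single while loop interleaving two pace cursors with elapsed counters.
import Mathlib
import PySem

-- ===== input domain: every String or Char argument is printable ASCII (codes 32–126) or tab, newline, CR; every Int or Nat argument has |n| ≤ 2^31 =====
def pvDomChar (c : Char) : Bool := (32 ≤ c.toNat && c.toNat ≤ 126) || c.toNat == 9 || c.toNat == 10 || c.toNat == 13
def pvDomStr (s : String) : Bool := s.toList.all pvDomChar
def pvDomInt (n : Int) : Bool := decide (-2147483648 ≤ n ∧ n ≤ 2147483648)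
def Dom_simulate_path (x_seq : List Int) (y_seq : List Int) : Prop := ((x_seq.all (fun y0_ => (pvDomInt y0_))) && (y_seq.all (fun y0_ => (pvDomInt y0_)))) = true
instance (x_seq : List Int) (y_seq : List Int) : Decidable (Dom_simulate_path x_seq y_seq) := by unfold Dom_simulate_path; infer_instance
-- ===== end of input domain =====

-- B expands each axis into a per-time-step timeline and zips the two timelines
-- with last-value padding, instead of A's interleaved two-cursor while loop (alternative decomposition).


-- ===== PORT A =====
-- `pace_duration = abs(pace) if pace != 0 else 1`
def pvDur (p : Int) : Nat := if p ≠ 0 then p.natAbs else 1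
-- `1 if pace > 0 else -1`
def pvStep (p : Int) : Int := if p > 0 then 1 else -1

-- A's while loop, transliterated with a fuel guard for totality only
-- (fuel is the total duration of both sequences, an upper bound on the
-- number of iterations; the 0-fuel branch is never reached).
def simulate_path_loop (x_seq : List Int) (y_seq : List Int) :
    Nat → Int → Int → Nat → Nat → Nat → Nat → List (Int × Int) → List (Int × Int)
  | 0, _, _, _, _, _, _, acc => acc
  | fuel + 1, x, y, xi, yi, xe, ye, acc =>
    if xi < x_seq.length ∨ yi < y_seq.length then
      -- Process X
      let sx :=
        if xi < x_seq.length then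
          let xp := x_seq.getD xi 0          -- in-bounds: exact for x_seq[x_idx]
          let d := pvDur xp
          let x1 := if xe = 0 ∧ xp ≠ 0 then x + pvStep xp else x
          let xe1 := xe + 1
          if xe1 ≥ d then (x1, xi + 1, 0) else (x1, xi, xe1)
        else (x, xi, xe)
      -- Process Y
      let sy :=
        if yi < y_seq.length then
          let yp := y_seq.getD yi 0
          let d := pvDur yp
          let y1 := if ye = 0 ∧ yp ≠ 0 then y + pvStep yp else y
          let ye1 := ye + 1
          if ye1 ≥ d then (y1, yi + 1, 0) else (y1, yi, ye1)
        else (y, yi, ye)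
      simulate_path_loop x_seq y_seq fuel sx.1 sy.1 sx.2.1 sy.2.1 sx.2.2 sy.2.2
        (acc ++ [(sx.1, sy.1)])
    else acc

def simulate_path (x_seq : List Int) (y_seq : List Int) : List (Int × Int) :=
  simulate_path_loop x_seq y_seq ((x_seq.map pvDur).sum + (y_seq.map pvDur).sum)
    0 0 0 0 0 0 []

-- ===== PORT B =====
-- Source B's `timeline(seq)` loop: per pace, move once, then emit the position `d` times
def pvTimeline : Int → List Int → List Int
  | _, [] => []
  | pos, p :: ps =>
      let d := if p ≠ 0 then p.natAbs else 1
      let pos' := if p ≠ 0 then pos + (if p > 0 then 1 else -1) else pos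
      List.replicate d pos' ++ pvTimeline pos' ps

-- Source B's `at(tl, t)`
def pvAt (tl : List Int) (t : Nat) : Int :=
  if t < tl.length then tl.getD t 0 else tl.getLastD 0

def simulate_path_alt (x_seq : List Int) (y_seq : List Int) : List (Int × Int) :=
  let tx := pvTimeline 0 x_seq
  let ty := pvTimeline 0 y_seq
  (List.range (max tx.length ty.length)).map (fun t => (pvAt tx t, pvAt ty t))

-- ===== PRECONDITION & SPEC =====
def Spec_simulate_path (x_seq : List Int) (y_seq : List Int) (out : List (Int × Int)) : Prop := out = simulate_path_alt x_seq y_seq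
instance (x_seq : List Int) (y_seq : List Int) (out : List (Int × Int)) : Decidable (Spec_simulate_path x_seq y_seq out) := by unfold Spec_simulate_path; infer_instance

-- ===== CLAIM (what is proved, stated in full; the proofs are below) =====
def Claim_equal_simulate_path : Prop := ∀ (x_seq : List Int) (y_seq : List Int), Dom_simulate_path x_seq y_seq → Spec_simulate_path x_seq y_seq (simulate_path x_seq y_seq)

-- ===== LEMMAS AND PROOFS =====

-- `at` generalized with an arbitrary default for the empty timeline
def pvAtD (a : Int) (tl : List Int) (t : Nat) : Int :=
  if t < tl.length then tl.getD t 0 else tl.getLastD a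

-- the remaining timeline of one axis from a mid-pace loop state
def pvRem (x : Int) (xs : List Int) (xe : Nat) : List Int :=
  match xs with
  | [] => []
  | p :: ps =>
      if xe = 0 then pvTimeline x (p :: ps)
      else List.replicate (pvDur p - xe) x ++ pvTimeline x ps

-- zip of two remaining timelines with current positions as defaults
def pvZipP : Int → Int → List Int → List Int → List (Int × Int)
  | _, _, [], [] => []
  | _, b, x :: tx, [] => (x, b) :: pvZipP x b tx []
  | a, _, [], y :: ty => (a, y) :: pvZipP a y [] ty
  | _, _, x :: tx, y :: ty => (x, y) :: pvZipP x y tx ty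

theorem pvDur_pos (p : Int) : 0 < pvDur p := by
  unfold pvDur; split <;> simp_all [Int.natAbs_pos]

theorem pvRem_zero (x : Int) (xs : List Int) : pvRem x xs 0 = pvTimeline x xs := by
  cases xs <;> simp [pvRem, pvTimeline]

theorem pvAtD_nil (a : Int) (t : Nat) : pvAtD a [] t = a := by
  simp [pvAtD]

theorem pvAtD_succ (a x : Int) (tx : List Int) (t : Nat) :
    pvAtD a (x :: tx) (t + 1) = pvAtD x tx t := by
  unfold pvAtD
  cases tx with
  | nil => simp
  | cons h l =>
    simp only [List.length_cons, Nat.add_lt_add_iff_right, List.getD_cons_succ,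
      List.getLastD_cons]

theorem pvZipP_eq_range (a b : Int) (tx ty : List Int) :
    pvZipP a b tx ty =
      (List.range (max tx.length ty.length)).map (fun t => (pvAtD a tx t, pvAtD b ty t)) := by
  induction a, b, tx, ty using pvZipP.induct with
  | case1 a b => simp [pvZipP]
  | case2 a b x tx ih =>
      rw [pvZipP, ih]
      simp only [List.length_cons, List.length_nil, Nat.max_eq_left (Nat.zero_le _),
        List.range_succ_eq_map, List.map_cons, List.map_map]
      refine List.cons_eq_cons.mpr ⟨by simp [pvAtD], ?_⟩
      apply List.map_congr_left; intro t _
      simp only [Function.comp_apply, Nat.succ_eq_add_one, pvAtD_succ, pvAtD_nil]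
  | case3 a b y ty ih =>
      rw [pvZipP, ih]
      simp only [List.length_cons, List.length_nil, Nat.max_eq_right (Nat.zero_le _),
        List.range_succ_eq_map, List.map_cons, List.map_map]
      refine List.cons_eq_cons.mpr ⟨by simp [pvAtD], ?_⟩
      apply List.map_congr_left; intro t _
      simp only [Function.comp_apply, Nat.succ_eq_add_one, pvAtD_succ, pvAtD_nil]
  | case4 a b x tx y ty ih =>
      rw [pvZipP, ih]
      have hmax : max (x :: tx).length (y :: ty).length = max tx.length ty.length + 1 := by
        simp only [List.length_cons]; omega
      rw [hmax, List.range_succ_eq_map]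
      simp only [List.map_cons, List.map_map]
      refine List.cons_eq_cons.mpr ⟨by simp [pvAtD], ?_⟩
      apply List.map_congr_left; intro t _
      simp only [Function.comp_apply, Nat.succ_eq_add_one, pvAtD_succ]

-- one step of the remaining timeline, matching A's per-axis update
theorem pvRem_cons_list (x p : Int) (ps : List Int) (xe : Nat) (hxe : xe < pvDur p) :
    pvRem x (p :: ps) xe =
      (if xe = 0 ∧ p ≠ 0 then x + pvStep p else x) ::
      (if xe + 1 ≥ pvDur p then
        pvRem (if xe = 0 ∧ p ≠ 0 then x + pvStep p else x) ps 0
      else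
        pvRem (if xe = 0 ∧ p ≠ 0 then x + pvStep p else x) (p :: ps) (xe + 1)) := by
  have hdpos := pvDur_pos p
  by_cases h0 : xe = 0
  · subst h0
    have hx' : (if (0 : Nat) = 0 ∧ p ≠ 0 then x + pvStep p else x)
        = if p ≠ 0 then x + (if p > 0 then 1 else -1) else x := by
      by_cases hp : p = 0 <;> simp [hp, pvStep]
    rw [hx']
    show pvTimeline x (p :: ps) = _
    rw [pvTimeline]
    by_cases hd : 0 + 1 ≥ pvDur p
    · have h1 : pvDur p = 1 := by omega
      rw [if_pos hd, pvRem_zero]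
      simp only [pvDur] at h1
      simp [h1]
    · rw [if_neg hd]
      have : pvRem (if p ≠ 0 then x + (if p > 0 then 1 else -1) else x) (p :: ps) (0 + 1) =
          List.replicate (pvDur p - 1) (if p ≠ 0 then x + (if p > 0 then 1 else -1) else x)
            ++ pvTimeline (if p ≠ 0 then x + (if p > 0 then 1 else -1) else x) ps := by
        simp [pvRem]
      rw [this]
      have hrep : List.replicate (pvDur p)
            (if p ≠ 0 then x + (if p > 0 then 1 else -1) else x) =
          (if p ≠ 0 then x + (if p > 0 then 1 else -1) else x) ::
            List.replicate (pvDur p - 1)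
              (if p ≠ 0 then x + (if p > 0 then 1 else -1) else x) := by
        have : pvDur p = (pvDur p - 1) + 1 := by omega
        rw [this, List.replicate_succ]
        simp
      simp only [pvDur] at hrep ⊢
      rw [hrep]
      simp
  · have hx' : (if xe = 0 ∧ p ≠ 0 then x + pvStep p else x) = x := by simp [h0]
    rw [hx']
    have hlhs : pvRem x (p :: ps) xe =
        List.replicate (pvDur p - xe) x ++ pvTimeline x ps := by
      simp [pvRem, h0]
    rw [hlhs]
    have hk : pvDur p - xe = (pvDur p - xe - 1) + 1 := by omega
    rw [hk, List.replicate_succ]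
    by_cases hd : xe + 1 ≥ pvDur p
    · have : pvDur p - xe - 1 = 0 := by omega
      rw [if_pos hd, this, pvRem_zero]
      simp
    · rw [if_neg hd]
      have : pvRem x (p :: ps) (xe + 1) =
          List.replicate (pvDur p - (xe + 1)) x ++ pvTimeline x ps := by
        simp [pvRem]
      rw [this]
      have : pvDur p - xe - 1 = pvDur p - (xe + 1) := by omega
      rw [this]
      simp

theorem pvRem_cons (x_seq : List Int) (x : Int) (xi xe : Nat)
    (h : xi < x_seq.length) (hxe : xe < pvDur (x_seq.getD xi 0)) :
    pvRem x (x_seq.drop xi) xe =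
      (if xe = 0 ∧ x_seq.getD xi 0 ≠ 0 then x + pvStep (x_seq.getD xi 0) else x) ::
      (if xe + 1 ≥ pvDur (x_seq.getD xi 0) then
        pvRem (if xe = 0 ∧ x_seq.getD xi 0 ≠ 0 then x + pvStep (x_seq.getD xi 0) else x) (x_seq.drop (xi + 1)) 0
      else
        pvRem (if xe = 0 ∧ x_seq.getD xi 0 ≠ 0 then x + pvStep (x_seq.getD xi 0) else x) (x_seq.drop xi) (xe + 1)) := by
  have hget : x_seq.getD xi 0 = x_seq[xi] := List.getD_eq_getElem x_seq 0 h
  have hd : x_seq.drop xi = x_seq.getD xi 0 :: x_seq.drop (xi + 1) := by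
    rw [hget]; exact List.drop_eq_getElem_cons h
  rw [hd, pvRem_cons_list x _ _ xe hxe, ← hd]

-- one axis step of A's loop body, as a function (the loop body is definitionally this)
def pvAx (seq : List Int) (v : Int) (i e : Nat) : Int × Nat × Nat :=
  if i < seq.length then
    let p := seq.getD i 0
    let d := pvDur p
    let v1 := if e = 0 ∧ p ≠ 0 then v + pvStep p else v
    let e1 := e + 1
    if e1 ≥ d then (v1, i + 1, 0) else (v1, i, e1)
  else (v, i, e)

theorem loop_succ (xs ys : List Int) (fuel : Nat) (x y : Int) (xi yi xe ye : Nat)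
    (acc : List (Int × Int)) :
    simulate_path_loop xs ys (fuel + 1) x y xi yi xe ye acc =
      if xi < xs.length ∨ yi < ys.length then
        simulate_path_loop xs ys fuel (pvAx xs x xi xe).1 (pvAx ys y yi ye).1
          (pvAx xs x xi xe).2.1 (pvAx ys y yi ye).2.1 (pvAx xs x xi xe).2.2 (pvAx ys y yi ye).2.2
          (acc ++ [((pvAx xs x xi xe).1, (pvAx ys y yi ye).1)])
      else acc := rfl

theorem pvAx_inactive (seq : List Int) (v : Int) (i e : Nat) (h : ¬ i < seq.length) :
    pvAx seq v i e = (v, i, e) := by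
  simp [pvAx, h]

theorem pvAx_rem (seq : List Int) (v : Int) (i e : Nat)
    (h : i < seq.length) (he : e < pvDur (seq.getD i 0)) :
    pvRem v (seq.drop i) e =
      (pvAx seq v i e).1 ::
        pvRem (pvAx seq v i e).1 (seq.drop (pvAx seq v i e).2.1) (pvAx seq v i e).2.2 := by
  have hc := pvRem_cons seq v i e h he
  simp only [ge_iff_le] at hc
  rw [hc]
  simp only [pvAx, if_pos h, ge_iff_le]
  by_cases hd : pvDur (seq.getD i 0) ≤ e + 1
  · simp only [if_pos hd]
  · simp only [if_neg hd]

theorem pvAx_inv (seq : List Int) (v : Int) (i e : Nat)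
    (he : i < seq.length → e < pvDur (seq.getD i 0)) :
    (pvAx seq v i e).2.1 < seq.length →
      (pvAx seq v i e).2.2 < pvDur (seq.getD (pvAx seq v i e).2.1 0) := by
  by_cases h : i < seq.length
  · simp only [pvAx, if_pos h, ge_iff_le]
    by_cases hd : pvDur (seq.getD i 0) ≤ e + 1
    · simp only [if_pos hd]
      intro _; exact pvDur_pos _
    · simp only [if_neg hd]
      intro _; omega
  · simp only [pvAx_inactive seq v i e h]
    exact he

theorem loop_eq (fuel : Nat) : ∀ (x_seq y_seq : List Int) (x y : Int)
    (xi yi xe ye : Nat) (acc : List (Int × Int)),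
    (xi < x_seq.length → xe < pvDur (x_seq.getD xi 0)) →
    (yi < y_seq.length → ye < pvDur (y_seq.getD yi 0)) →
    (pvRem x (x_seq.drop xi) xe).length + (pvRem y (y_seq.drop yi) ye).length ≤ fuel →
    simulate_path_loop x_seq y_seq fuel x y xi yi xe ye acc =
      acc ++ pvZipP x y (pvRem x (x_seq.drop xi) xe) (pvRem y (y_seq.drop yi) ye) := by
  induction fuel with
  | zero =>
    intro xs ys x y xi yi xe ye acc hIx hIy hF
    have hx0 : pvRem x (xs.drop xi) xe = [] := List.length_eq_zero_iff.mp (by omega)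
    have hy0 : pvRem y (ys.drop yi) ye = [] := List.length_eq_zero_iff.mp (by omega)
    rw [hx0, hy0]
    simp [simulate_path_loop, pvZipP]
  | succ fuel ih =>
    intro xs ys x y xi yi xe ye acc hIx hIy hF
    by_cases hx : xi < xs.length <;> by_cases hy : yi < ys.length
    · -- both axes active
      rw [loop_succ, if_pos (Or.inl hx)]
      have ex := pvAx_rem xs x xi xe hx (hIx hx)
      have ey := pvAx_rem ys y yi ye hy (hIy hy)
      have hlx := congrArg List.length ex
      have hly := congrArg List.length ey
      simp only [List.length_cons] at hlx hly
      rw [ex, ey, pvZipP]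
      rw [ih xs ys _ _ _ _ _ _ _ (pvAx_inv xs x xi xe hIx) (pvAx_inv ys y yi ye hIy)
        (by omega)]
      simp
    · -- only x active
      rw [loop_succ, if_pos (Or.inl hx)]
      have ex := pvAx_rem xs x xi xe hx (hIx hx)
      have hlx := congrArg List.length ex
      simp only [List.length_cons] at hlx
      have dy : ys.drop yi = [] := List.drop_eq_nil_of_le (Nat.le_of_not_lt hy)
      have hy0 : ∀ (b : Int) (e : Nat), pvRem b (ys.drop yi) e = [] := by
        intro b e; rw [dy]; rfl
      rw [pvAx_inactive ys y yi ye hy]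
      rw [ex, hy0, pvZipP]
      rw [ih xs ys _ _ _ _ _ _ _ (pvAx_inv xs x xi xe hIx) hIy
        (by rw [hy0]; rw [hy0] at hF; simp at hF ⊢; omega)]
      rw [hy0]
      simp
    · -- only y active
      rw [loop_succ, if_pos (Or.inr hy)]
      have ey := pvAx_rem ys y yi ye hy (hIy hy)
      have hly := congrArg List.length ey
      simp only [List.length_cons] at hly
      have dx : xs.drop xi = [] := List.drop_eq_nil_of_le (Nat.le_of_not_lt hx)
      have hx0 : ∀ (a : Int) (e : Nat), pvRem a (xs.drop xi) e = [] := by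
        intro a e; rw [dx]; rfl
      rw [pvAx_inactive xs x xi xe hx]
      rw [ey, hx0, pvZipP]
      rw [ih xs ys _ _ _ _ _ _ _ hIx (pvAx_inv ys y yi ye hIy)
        (by rw [hx0]; rw [hx0] at hF; simp at hF ⊢; omega)]
      rw [hx0]
      simp
    · -- both exhausted
      rw [loop_succ, if_neg (by omega)]
      have dx : xs.drop xi = [] := List.drop_eq_nil_of_le (Nat.le_of_not_lt hx)
      have dy : ys.drop yi = [] := List.drop_eq_nil_of_le (Nat.le_of_not_lt hy)
      rw [dx, dy]
      simp [pvRem, pvZipP]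

theorem timeline_length (pos : Int) (s : List Int) :
    (pvTimeline pos s).length = (s.map pvDur).sum := by
  induction s generalizing pos with
  | nil => simp [pvTimeline]
  | cons p ps ih => simp [pvTimeline, ih, pvDur]

-- ===== VERDICT (by name: the statement is the Claim_ definition above) =====
theorem simulate_path_spec : Claim_equal_simulate_path := by
  intro x_seq y_seq _hdom
  unfold Spec_simulate_path simulate_path simulate_path_alt
  rw [loop_eq _ x_seq y_seq 0 0 0 0 0 0 []
      (fun h => pvDur_pos _) (fun h => pvDur_pos _)
      (by simp [pvRem_zero, timeline_length])]
  simp only [List.drop_zero, pvRem_zero, List.nil_append]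
  rw [pvZipP_eq_range]
  apply List.map_congr_left; intro t _
  simp [pvAtD, pvAt]
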